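-- pv_equiv track=rewrite | github.com/The-devop/Cipher-Labs | crypto_core.py | shift_odd_even
-- ===== SOURCE A (Python) =====
-- A_ORD = ord("A")
--
-- def _clean(text: str) -> str:
--     """Convert text to uppercase"""
--     return text.upper()
--
-- def _char_to_num(c: str) -> int:
--     """Convert letter to 0-25"""
--     return ord(c) - A_ORD
--
-- def _num_to_char(n: int) -> str:
--     """Convert 0-25 to letter (wraps around)"""
--     return chr(((n % 26) + 26) % 26 + A_ORD)
--
-- def shift_odd_even(text: str, shift: int = 1) -> str:
--     """Shift odd positions one way, even another"""
--     text = _clean(text)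
--     result = []
--     for i, ch in enumerate(text):
--         if ch.isalpha():
--             if i % 2 == 0:
--                 result.append(_num_to_char(_char_to_num(ch) + shift))
--             else:
--                 result.append(_num_to_char(_char_to_num(ch) - shift))
--         else:
--             result.append(ch)
--     return "".join(result)
-- ===== SOURCE B (Python) =====
-- A_ORD = ord("A")
--
-- def _rot(c, s):
--     """Caesar-shift one uppercase letter by s; non-letters unchanged."""
--     if c.isalpha():
--         return chr((ord(c) - A_ORD + s) % 26 + A_ORD)
--     return c
--
-- def shift_odd_even(text: str, shift: int = 1) -> str:
--     """Shift odd positions one way, even another"""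
--     t = text.upper()
--     ev, od, at_even = [], [], True
--     for c in t:
--         if at_even:
--             ev.append(c)
--         else:
--             od.append(c)
--         at_even = not at_even
--     ev = [_rot(c, shift) for c in ev]
--     od = [_rot(c, -shift) for c in od]
--     out = [x for pair in zip(ev, od) for x in pair] + ev[len(od):]
--     return "".join(out)
-- ===== Notes on version B (the rewrite author's own statement) =====
-- stated objective: alternative
-- what changed: Replaced A's single enumerate-indexed loop with a parity-based decomposition: split the uppercased text into even- and odd-index subsequences, apply a uniform +shift pass to one and -shift to the other, and interleave the results back; the double-mod helper is collapsed to a single Python mod.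
import Mathlib
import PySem

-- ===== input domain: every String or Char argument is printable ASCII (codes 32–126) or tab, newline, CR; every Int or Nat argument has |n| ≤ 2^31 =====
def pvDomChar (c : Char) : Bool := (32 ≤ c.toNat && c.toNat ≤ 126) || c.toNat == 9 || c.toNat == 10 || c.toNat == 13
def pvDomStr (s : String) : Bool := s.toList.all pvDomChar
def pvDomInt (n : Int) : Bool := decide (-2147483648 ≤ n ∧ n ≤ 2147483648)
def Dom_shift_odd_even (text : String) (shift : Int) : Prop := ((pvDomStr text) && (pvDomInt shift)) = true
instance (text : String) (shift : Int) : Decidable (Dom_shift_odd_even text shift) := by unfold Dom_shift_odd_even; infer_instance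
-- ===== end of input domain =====

-- B replaces A's single enumerate-indexed loop by a parity split into two lists,
-- one uniform shift pass over each, and a zip-merge (objective: alternative decomposition).

-- ===== PORT A =====
-- ord(c) is ported as (c.toNat : Int) and chr(n) as Char.ofNat n.toNat: exact here,
-- since every chr argument in A is ((n % 26) + 26) % 26 + 65 ∈ [65, 91).
def pvCharToNum (c : Char) : Int := (c.toNat : Int) - 65

def pvNumToChar (n : Int) : Char :=
  Char.ofNat (PySem.Int.mod (PySem.Int.mod n 26 + 26) 26 + 65).toNat

-- result is a list of single-character strings, modelled as List Char;
-- the final "".join(result) is then String.ofList.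
def shift_odd_even (text : String) (shift : Int) : String :=
  let t := PySem.Str.upper text
  let result := (PySem.List.enumerate t.toList 0).foldl
    (fun (r : List Char) (p : Int × Char) =>
      if PySem.Chars.isalpha p.2 then
        if PySem.Int.mod p.1 2 = 0 then
          r ++ [pvNumToChar (pvCharToNum p.2 + shift)]
        else
          r ++ [pvNumToChar (pvCharToNum p.2 - shift)]
      else r ++ [p.2]) []
  String.ofList result

-- ===== PORT B =====
def pvRot (c : Char) (s : Int) : Char :=
  if PySem.Chars.isalpha c then
    Char.ofNat (PySem.Int.mod ((c.toNat : Int) - 65 + s) 26 + 65).toNat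
  else c

-- state of B's distribution loop: (ev, od, at_even)
def shift_odd_even_alt (text : String) (shift : Int) : String :=
  let t := PySem.Str.upper text
  let st := t.toList.foldl
    (fun (st : List Char × List Char × Bool) c =>
      if st.2.2 then (st.1 ++ [c], st.2.1, false) else (st.1, st.2.1 ++ [c], true))
    ([], [], true)
  let ev := st.1.map (fun c => pvRot c shift)
  let od := st.2.1.map (fun c => pvRot c (-shift))
  -- ev[len(od):] is the slice below
  let out := (ev.zip od).flatMap (fun q => [q.1, q.2])
      ++ PySem.List.slice ev (some (od.length : Int)) none
  String.ofList out

-- ===== PRECONDITION & SPEC =====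
def Spec_shift_odd_even (text : String) (shift : Int) (out : String) : Prop := out = shift_odd_even_alt text shift
instance (text : String) (shift : Int) (out : String) : Decidable (Spec_shift_odd_even text shift out) := by unfold Spec_shift_odd_even; infer_instance

-- ===== CLAIM (what is proved, stated in full; the proofs are below) =====
def Claim_equal_shift_odd_even : Prop := ∀ (text : String) (shift : Int), Dom_shift_odd_even text shift → Spec_shift_odd_even text shift (shift_odd_even text shift)

-- ===== LEMMAS AND PROOFS =====

-- Proof-side helpers: the even/odd split and the alternating merge, structurally.
def pvSplit : List Char → List Char × List Char
  | [] => ([], [])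
  | c :: rest =>
    let p := pvSplit rest
    (c :: p.2, p.1)

def pvInterleave : List Char → List Char → List Char
  | [], ys => ys
  | x :: xs, ys => x :: pvInterleave ys xs
termination_by xs ys => xs.length + ys.length

-- A's per-character action, factored out of the fold body.
def pvStepA (s i : Int) (c : Char) : Char :=
  if PySem.Chars.isalpha c then
    if PySem.Int.mod i 2 = 0 then pvNumToChar (pvCharToNum c + s)
    else pvNumToChar (pvCharToNum c - s)
  else c

-- pvStepA, seen as "rotate by +s at even indices, by -s at odd ones".
def pvRotIdx (n s : Int) (c : Char) : Char :=
  pvRot c (if PySem.Int.mod n 2 = 0 then s else -s)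

lemma pvNumToChar_eq_rot (c : Char) (h : PySem.Chars.isalpha c = true) (s : Int) :
    pvNumToChar (pvCharToNum c + s) = pvRot c s := by
  simp only [pvNumToChar, pvCharToNum, pvRot, h, if_pos]
  congr 1
  have h2 : ∀ a : Int, PySem.Int.mod a 26 = a % 26 :=
    fun a => PySem.Int.mod_eq_emod_of_pos (by omega)
  simp only [h2]
  omega

lemma pvStepA_eq_rotIdx (s i : Int) (c : Char) :
    pvStepA s i c = pvRotIdx i s c := by
  unfold pvStepA pvRotIdx
  by_cases h : PySem.Chars.isalpha c = true
  · simp only [h, if_pos]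
    by_cases hp : PySem.Int.mod i 2 = 0
    · simp only [hp, if_pos, pvNumToChar_eq_rot c h s]
    · simp only [hp, ite_false]
      have := pvNumToChar_eq_rot c h (-s)
      simpa [sub_eq_add_neg] using this
  · simp [h, pvRot]

lemma pvRotIdx_add_two (n s : Int) : pvRotIdx (n + 2) s = pvRotIdx n s := by
  funext c
  unfold pvRotIdx
  have h1 : PySem.Int.mod (n + 2) 2 = (n + 2) % 2 := PySem.Int.mod_eq_emod_of_pos (by omega)
  have h2 : PySem.Int.mod n 2 = n % 2 := PySem.Int.mod_eq_emod_of_pos (by omega)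
  rw [h1, h2]
  congr 1
  have : (n + 2) % 2 = n % 2 := by omega
  rw [this]

lemma pvFoldl_append (g : Int × Char → Char) :
    ∀ (l : List (Int × Char)) (acc : List Char),
      l.foldl (fun r p => r ++ [g p]) acc = acc ++ l.map g := by
  intro l
  induction l with
  | nil => intro acc; simp
  | cons p t ih => intro acc; simp [List.foldl, ih]

-- A's result is the interleave of the two uniformly-shifted halves.
lemma pvKey (s : Int) :
    ∀ (l : List Char) (n : Int),
      (PySem.List.enumerate l n).map (fun p => pvStepA s p.1 p.2)
      = pvInterleave ((pvSplit l).1.map (pvRotIdx n s))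
                     ((pvSplit l).2.map (pvRotIdx (n + 1) s)) := by
  intro l
  induction l with
  | nil => intro n; simp [PySem.List.enumerate_nil, pvSplit, pvInterleave]
  | cons c rest ih =>
    intro n
    rw [PySem.List.enumerate_cons]
    simp only [List.map_cons, pvSplit, pvInterleave]
    rw [pvStepA_eq_rotIdx, ih (n + 1)]
    have h2 : pvRotIdx (n + 1 + 1) s = pvRotIdx n s := by
      have h : n + 1 + 1 = n + 2 := by ring
      rw [h, pvRotIdx_add_two]
    rw [h2]

lemma pvRotIdx_zero (s : Int) : pvRotIdx 0 s = fun c => pvRot c s := by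
  funext c; simp [pvRotIdx, PySem.Int.mod]

lemma pvRotIdx_one (s : Int) : pvRotIdx 1 s = fun c => pvRot c (-s) := by
  funext c
  simp only [pvRotIdx]
  have h : PySem.Int.mod 1 2 = 1 % 2 := PySem.Int.mod_eq_emod_of_pos (by omega)
  rw [h]
  norm_num

-- B's distribution loop computes pvSplit (both toggle phases at once).
lemma pvFold_split :
    ∀ (l : List Char) (e o : List Char),
      l.foldl (fun (st : List Char × List Char × Bool) c =>
          if st.2.2 then (st.1 ++ [c], st.2.1, false) else (st.1, st.2.1 ++ [c], true))
        (e, o, true)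
        = (e ++ (pvSplit l).1, o ++ (pvSplit l).2, decide (l.length % 2 = 0))
      ∧ l.foldl (fun (st : List Char × List Char × Bool) c =>
          if st.2.2 then (st.1 ++ [c], st.2.1, false) else (st.1, st.2.1 ++ [c], true))
        (e, o, false)
        = (e ++ (pvSplit l).2, o ++ (pvSplit l).1, decide (l.length % 2 = 1)) := by
  intro l
  induction l with
  | nil => intro e o; simp [pvSplit]
  | cons c rest ih =>
    intro e o
    constructor
    · simp only [List.foldl_cons, if_pos, pvSplit]
      rw [(ih (e ++ [c]) o).2]
      simp only [List.append_assoc, List.singleton_append]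
      congr 1
      · congr 1
        simp [List.length_cons, Nat.succ_mod_two_eq_zero_iff]
    · simp only [List.foldl_cons, pvSplit, Bool.false_eq_true, ite_false]
      rw [(ih e (o ++ [c])).1]
      simp only [List.append_assoc, List.singleton_append]
      congr 1
      · congr 1
        simp [List.length_cons, Nat.succ_mod_two_eq_one_iff]

-- the two halves differ in length by at most one
lemma pvSplit_length :
    ∀ l : List Char,
      (pvSplit l).2.length ≤ (pvSplit l).1.length
      ∧ (pvSplit l).1.length ≤ (pvSplit l).2.length + 1 := by
  intro l
  induction l with
  | nil => simp [pvSplit]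
  | cons c rest ih =>
    simp only [pvSplit, List.length_cons]
    omega

-- zip-merge plus the leftover tail IS the alternating merge, when the lengths differ by ≤ 1
lemma pvZip_interleave :
    ∀ (xs ys : List Char), ys.length ≤ xs.length → xs.length ≤ ys.length + 1 →
      (xs.zip ys).flatMap (fun q => [q.1, q.2]) ++ xs.drop ys.length
        = pvInterleave xs ys := by
  intro xs
  induction xs with
  | nil =>
    intro ys h1 _
    have : ys = [] := List.eq_nil_of_length_eq_zero (by simpa using h1)
    simp [this, pvInterleave]
  | cons x xs' ih =>
    intro ys h1 h2
    cases ys with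
    | nil => simp [pvInterleave.eq_def]
    | cons y ys' =>
      simp only [List.length_cons] at h1 h2
      have h1' : ys'.length ≤ xs'.length := by omega
      have h2' : xs'.length ≤ ys'.length + 1 := by omega
      simp only [List.zip_cons_cons, List.flatMap_cons, List.length_cons, List.drop_succ_cons]
      have hI : pvInterleave (x :: xs') (y :: ys') = x :: y :: pvInterleave xs' ys' := by
        simp [pvInterleave]
      rw [hI, ← ih ys' h1' h2']
      simp

-- ===== VERDICT (by name: the statement is the Claim_ definition above) =====
theorem shift_odd_even_spec : Claim_equal_shift_odd_even := by
  intro text shift _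
  unfold Spec_shift_odd_even shift_odd_even shift_odd_even_alt
  refine congrArg String.ofList ?_
  have hbody : (fun (r : List Char) (p : Int × Char) =>
      if PySem.Chars.isalpha p.2 then
        if PySem.Int.mod p.1 2 = 0 then
          r ++ [pvNumToChar (pvCharToNum p.2 + shift)]
        else
          r ++ [pvNumToChar (pvCharToNum p.2 - shift)]
      else r ++ [p.2])
      = (fun (r : List Char) (p : Int × Char) => r ++ [pvStepA shift p.1 p.2]) := by
    funext r p
    unfold pvStepA
    split_ifs <;> rfl
  rw [hbody, pvFoldl_append, List.nil_append, pvKey shift _ 0]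
  simp only [zero_add]
  rw [pvRotIdx_zero, pvRotIdx_one]
  -- now rewrite B's side into the same interleave
  rw [(pvFold_split (PySem.Str.upper text).toList [] []).1]
  simp only [List.nil_append]
  set l := (PySem.Str.upper text).toList with hl
  have hlen := pvSplit_length l
  set ev := (pvSplit l).1.map (fun c => pvRot c shift) with hev
  set od := (pvSplit l).2.map (fun c => pvRot c (-shift)) with hod
  have h1 : od.length ≤ ev.length := by
    simp only [hev, hod, List.length_map]; exact hlen.1
  have h2 : ev.length ≤ od.length + 1 := by
    simp only [hev, hod, List.length_map]; exact hlen.2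
  rw [PySem.List.slice_from_natCast]
  exact (pvZip_interleave ev od h1 h2).symm
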